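-- pv_equiv track=rewrite | github.com/JustRedTTG/pythonide | common.py | cursor_index
-- ===== SOURCE A (Python) =====
-- def cursor_index(index, lines) -> tuple[int, int]:
--     for lines_deep, line in enumerate(lines):
--         if index >= len(line):
--             index -= len(line)
--         else: break
--     else:
--         index += len(line)
--     return lines_deep, index
-- ===== SOURCE B (Python) =====
-- from itertools import accumulate
-- from bisect import bisect_right
--
-- def cursor_index(index, lines):
--     cum = list(accumulate(len(l) for l in lines))
--     i = bisect_right(cum, index)
--     if i == len(lines):
--         i -= 1
--     prev = cum[i] - len(lines[i])
--     return i, index - prev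
-- ===== Notes on version B (the rewrite author's own statement) =====
-- stated objective: alternative
-- what changed: replaces A's sequential subtract-each-line-length loop by a precomputed prefix-sum table of line lengths with a bisect_right lookup (clamped to the last line), computing the column as index minus the prefix before the found line
import Mathlib
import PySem

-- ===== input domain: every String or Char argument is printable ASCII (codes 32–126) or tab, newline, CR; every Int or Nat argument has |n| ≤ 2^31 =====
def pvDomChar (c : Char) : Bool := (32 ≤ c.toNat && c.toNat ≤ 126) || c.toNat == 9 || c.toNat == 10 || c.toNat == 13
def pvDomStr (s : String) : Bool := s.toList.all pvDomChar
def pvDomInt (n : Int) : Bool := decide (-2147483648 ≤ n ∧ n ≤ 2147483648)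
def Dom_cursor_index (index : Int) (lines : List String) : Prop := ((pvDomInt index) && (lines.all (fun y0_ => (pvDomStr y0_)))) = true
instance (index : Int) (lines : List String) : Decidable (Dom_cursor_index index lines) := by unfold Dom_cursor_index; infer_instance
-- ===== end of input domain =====

-- B replaces A's sequential subtraction loop by a prefix-sum table plus a
-- bisect_right lookup (different decomposition; not claimed faster).

-- ===== PORT A =====
-- A's for/else loop: walk the lines, subtracting each length while index ≥ len(line);
-- on exhaustion (for-else) add the last length back.  `i` is Python's `lines_deep`.
def cursorALoop (index : Int) (i : Int) : List String → Int × Int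
  | [] => (i, index)          -- unreachable under Pre_ (lines ≠ [])
  | l :: rest =>
      if index ≥ (PySem.Str.len l : Int) then
        match rest with
        | [] => (i, (index - (PySem.Str.len l : Int)) + (PySem.Str.len l : Int))  -- for-else: index += len(line)
        | _ :: _ => cursorALoop (index - (PySem.Str.len l : Int)) (i + 1) rest
      else (i, index)

def cursor_index (index : Int) (lines : List String) : Int × Int :=
  cursorALoop index 0 lines

-- ===== PORT B =====
-- cum = list(accumulate(len(l) for l in lines)) : cumulative line lengths
def cursorCum (lens : List Int) : List Int := (List.scanl (· + ·) 0 lens).tail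

-- bisect_right on a sorted list = number of leading elements ≤ index
def cursorBisectR (cum : List Int) (index : Int) : Nat :=
  (cum.takeWhile (fun c => c ≤ index)).length

def cursor_index_alt (index : Int) (lines : List String) : Int × Int :=
  let lens := lines.map (fun l => (PySem.Str.len l : Int))
  let cum := cursorCum lens
  let i0 := cursorBisectR cum index
  let i := if i0 = lines.length then i0 - 1 else i0
  let prev := cum.getD i 0 - lens.getD i 0
  ((i : Int), index - prev)

-- ===== PRECONDITION & SPEC =====
-- Pre_ excludes only the empty list of lines, on which Python A raises
-- UnboundLocalError (B raises IndexError there).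
def Pre_cursor_index (index : Int) (lines : List String) : Prop := lines ≠ []
instance (index : Int) (lines : List String) : Decidable (Pre_cursor_index index lines) := by unfold Pre_cursor_index; infer_instance
def pvWitness_cursor_index : Int × List String := (3, ["ab", "cde"])

def Spec_cursor_index (index : Int) (lines : List String) (out : Int × Int) : Prop := out = cursor_index_alt index lines
instance (index : Int) (lines : List String) (out : Int × Int) : Decidable (Spec_cursor_index index lines out) := by unfold Spec_cursor_index; infer_instance

-- ===== CLAIM (what is proved, stated in full; the proofs are below) =====
def Claim_equal_cursor_index : Prop := ∀ (index : Int) (lines : List String), Dom_cursor_index index lines → Pre_cursor_index index lines → Spec_cursor_index index lines (cursor_index index lines)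

-- ===== LEMMAS AND PROOFS =====

theorem cursorALoop_cons_cons (index i : Int) (l m : String) (ms : List String) :
    cursorALoop index i (l :: m :: ms) =
      if index ≥ (PySem.Str.len l : Int) then
        cursorALoop (index - (PySem.Str.len l : Int)) (i + 1) (m :: ms)
      else (i, index) := rfl

theorem cursorALoop_single (index i : Int) (l : String) :
    cursorALoop index i [l] =
      if index ≥ (PySem.Str.len l : Int) then
        (i, (index - (PySem.Str.len l : Int)) + (PySem.Str.len l : Int))
      else (i, index) := rfl

-- A's accumulator only offsets the first component.
theorem cursorALoop_shift (index i : Int) (ls : List String) :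
    cursorALoop index i ls = (i + (cursorALoop index 0 ls).1, (cursorALoop index 0 ls).2) := by
  induction ls generalizing index i with
  | nil => simp [cursorALoop]
  | cons l rest ih =>
      cases rest with
      | nil => rw [cursorALoop_single, cursorALoop_single]; split_ifs <;> simp
      | cons m ms =>
          rw [cursorALoop_cons_cons, cursorALoop_cons_cons]
          split_ifs with h
          · rw [ih _ (i + 1), ih _ (0 + 1)]
            refine Prod.ext ?_ rfl
            simp; ring
          · simp

theorem scanl_add_shift (as : List Int) (c d : Int) :
    List.scanl (· + ·) (d + c) as = (List.scanl (· + ·) c as).map (fun x => d + x) := by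
  induction as generalizing c with
  | nil => simp [List.scanl_nil]
  | cons b bs ih =>
      simp only [List.scanl_cons, List.map_cons]
      exact congrArg₂ List.cons rfl
        (by rw [show d + c + b = d + (c + b) by ring, ih (c + b)])

theorem cursorCum_cons (L : Int) (lens : List Int) :
    cursorCum (L :: lens) = L :: (cursorCum lens).map (fun x => L + x) := by
  unfold cursorCum
  rw [List.scanl_cons, List.tail_cons]
  rw [show (0 : Int) + L = L + 0 by ring, scanl_add_shift lens 0 L]
  cases lens <;> simp [List.scanl_cons, List.scanl_nil]

theorem cursorCum_length (lens : List Int) : (cursorCum lens).length = lens.length := by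
  unfold cursorCum
  rw [List.length_tail, List.length_scanl]
  omega

theorem getD_map_add (L : Int) (xs : List Int) (n : Nat) (hn : n < xs.length) :
    ((xs.map (fun x => L + x)).getD n 0) = L + xs.getD n 0 := by
  simp [List.getD, List.getElem?_map, List.getElem?_eq_getElem hn]

theorem bisect_cons (L index : Int) (cum : List Int) (hidx : index ≥ L) :
    cursorBisectR (L :: cum.map (fun x => L + x)) index
      = cursorBisectR cum (index - L) + 1 := by
  unfold cursorBisectR
  simp only [List.takeWhile]
  rw [decide_eq_true (by omega : L ≤ index)]
  simp only [List.length_cons]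
  congr 1
  rw [List.takeWhile_map, List.length_map]
  have hp : ((fun c => decide (c ≤ index)) ∘ fun x => L + x)
      = (fun c => decide (c ≤ index - L)) := by
    funext x
    simp only [Function.comp]
    rw [decide_eq_decide]
    omega
  rw [hp]

theorem bisect_le_length (cum : List Int) (index : Int) :
    cursorBisectR cum index ≤ cum.length := by
  unfold cursorBisectR
  induction cum with
  | nil => simp
  | cons a as ih =>
      simp only [List.takeWhile_cons]
      split <;> simp
      omega

theorem main_lemma (index : Int) (lines : List String) (h : lines ≠ []) :
    cursor_index index lines = cursor_index_alt index lines := by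
  induction lines generalizing index with
  | nil => exact absurd rfl h
  | cons l rest ih =>
      set L : Int := (PySem.Str.len l : Int) with hL
      by_cases hr : rest = []
      · subst hr
        simp only [cursor_index, cursorALoop_single, cursor_index_alt, cursorCum, cursorBisectR,
          List.map, List.scanl, List.tail, List.length]
        split_ifs with h1 h2 h2 <;> simp_all
      · have hrest : ∀ (j : Int), cursor_index j rest = cursor_index_alt j rest := fun j => ih j hr
        by_cases hidx : index ≥ L
        · -- A subtracts L and recurses; B's bisect strips the first cum entry
          have hA : cursor_index index (l :: rest) =
              (1 + (cursor_index (index - L) rest).1, (cursor_index (index - L) rest).2) := by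
            cases rest with
            | nil => exact absurd rfl hr
            | cons m ms =>
                simp only [cursor_index]
                rw [cursorALoop_cons_cons, if_pos hidx, cursorALoop_shift]
                refine Prod.ext ?_ rfl
                rw [hL]
                ring_nf
          rw [hA, hrest (index - L)]
          simp only [cursor_index_alt, List.map, List.length]
          rw [cursorCum_cons]
          set lens := rest.map (fun s => (PySem.Str.len s : Int)) with hlens
          set cum := cursorCum lens with hcum
          have hlenlens : lens.length = rest.length := by rw [hlens, List.length_map]
          have hlencum : cum.length = rest.length := by rw [hcum, cursorCum_length, hlenlens]
          rw [bisect_cons L index cum hidx]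
          set i0 := cursorBisectR cum (index - L) with hi0
          have hi0le : i0 ≤ rest.length := hlencum ▸ bisect_le_length cum (index - L)
          have hrlen : 1 ≤ rest.length := by
            cases rest with | nil => exact absurd rfl hr | cons _ _ => simp
          by_cases hfull : i0 = rest.length
          · rw [if_pos (by omega : i0 + 1 = rest.length + 1), if_pos hfull]
            rw [show i0 + 1 - 1 = i0 from by omega]
            obtain ⟨k, hk⟩ : ∃ k, i0 = k + 1 := ⟨i0 - 1, by omega⟩
            have hkc : k < cum.length := by omega
            have hkl : k < lens.length := by omega
            clear_value i0
            subst hk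
            simp only [Nat.add_sub_cancel, List.getD_cons_succ]
            rw [getD_map_add L cum k hkc]
            refine Prod.ext ?_ ?_
            · simp; ring
            · simp; ring
          · rw [if_neg (by omega : ¬ i0 + 1 = rest.length + 1), if_neg hfull]
            simp only [List.getD_cons_succ]
            rw [getD_map_add L cum i0 (by omega)]
            refine Prod.ext ?_ ?_
            · simp; ring
            · simp; ring
        · -- A breaks immediately at line 0; B's bisect returns 0
          have hA : cursor_index index (l :: rest) = (0, index) := by
            cases rest with
            | nil =>
                simp only [cursor_index]
                rw [cursorALoop_single, if_neg (by omega)]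
            | cons m ms =>
                simp only [cursor_index]
                rw [cursorALoop_cons_cons, if_neg (by omega)]
          rw [hA]
          simp only [cursor_index_alt, List.map, List.length]
          rw [cursorCum_cons]
          have hbis : cursorBisectR
              (L :: (cursorCum (rest.map (fun s => (PySem.Str.len s : Int)))).map (fun x => L + x))
              index = 0 := by
            unfold cursorBisectR
            simp only [List.takeWhile]
            rw [decide_eq_false (by omega : ¬ L ≤ index)]
            rfl
          rw [hbis, if_neg (by simp : ¬ (0 : Nat) = rest.length + 1)]
          simp

-- ===== VERDICT (by name: the statement is the Claim_ definition above) =====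
theorem cursor_index_spec : Claim_equal_cursor_index := by
  intro index lines _ hpre
  exact main_lemma index lines hpre
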